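-- pv_equiv track=rewrite | github.com/Tanujamw1902/Daily-DSA-Problem-Log | Arrays/Delete_In_Sorted_Array.py | delete_element
-- ===== SOURCE A (Python) =====
-- def binary_search(arr, target):
--     left, right = 0, len(arr) - 1
--
--     while left <= right:
--         mid = left + (right - left) // 2
--         if arr[mid] == target:
--             return mid  # Element found, return its index
--         elif arr[mid] < target:
--             left = mid + 1  # Search in the right half
--         else:
--             right = mid - 1  # Search in the left half
--
--     return -1  # Element not found
--
-- def delete_element(arr, target):
--     index = binary_search(arr, target)
--     if index != -1:
--         # Shift elements to the left to remove the target element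
--         for i in range(index, len(arr) - 1):
--             arr[i] = arr[i + 1]
--         # Remove the last element (duplicated after shifting)
--         arr.pop()
--         return True  # Element deleted successfully
--     else:
--         return False  # Element not found
-- ===== SOURCE B (Python) =====
-- def delete_element(arr, target):
--     # Linear forward scan for the first occurrence (array is sorted, so any
--     # equal duplicate is interchangeable), then delete it in place.
--     index = -1
--     for i in range(len(arr)):
--         if arr[i] == target:
--             index = i
--             break
--     if index == -1:
--         return False
--     del arr[index]
--     return True
-- ===== Notes on version B (the rewrite author's own statement) =====
-- stated objective: simpler
-- what changed: Replaces the binary-search helper with a single linear forward scan for the first occurrence and deletes via del instead of a manual shift loop plus pop.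
-- outside the precondition, e.g. on delete_element([3, 1], 1): A returns False, B returns True
import Mathlib
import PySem

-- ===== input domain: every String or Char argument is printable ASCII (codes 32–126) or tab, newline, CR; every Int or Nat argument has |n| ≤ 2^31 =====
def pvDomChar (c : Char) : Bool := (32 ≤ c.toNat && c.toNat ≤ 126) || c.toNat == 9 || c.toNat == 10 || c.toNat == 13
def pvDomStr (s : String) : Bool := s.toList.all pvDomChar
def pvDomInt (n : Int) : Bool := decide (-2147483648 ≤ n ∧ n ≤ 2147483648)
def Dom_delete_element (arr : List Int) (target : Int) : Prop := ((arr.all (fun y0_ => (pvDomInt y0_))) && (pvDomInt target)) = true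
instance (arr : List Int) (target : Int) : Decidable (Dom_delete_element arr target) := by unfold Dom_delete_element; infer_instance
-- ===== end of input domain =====

-- B replaces the binary-search helper with a linear first-occurrence scan; A also mutates arr in
-- place (shift + pop) and B mutates it with del — the equivalence proved here is about the RETURN value only.

-- ===== PORT A =====
-- the 'while left <= right' loop, ported with a fuel counter (fuel = len+1 at the call site is
-- sufficient: the window right+1-left shrinks by at least one every iteration, so fuel 0 is never
-- reached there); the 'none' branch of arr[mid] is unreachable on the calls made (Python would
-- raise IndexError there)
def bsLoop (arr : List Int) (target : Int) (fuel : Nat) (left right : Int) : Int :=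
  match fuel with
  | 0 => -1
  | fuel + 1 =>
    if left ≤ right then
      let mid := left + PySem.Int.floordiv (right - left) 2
      match PySem.List.pyGet? arr mid with
      | some v =>
        if v = target then mid
        else if v < target then bsLoop arr target fuel (mid + 1) right
        else bsLoop arr target fuel left (mid - 1)
      | none => -1
    else -1

def delete_element (arr : List Int) (target : Int) : Bool :=
  let index := bsLoop arr target (arr.length + 1) 0 ((arr.length : Int) - 1)
  if index ≠ -1 then true else false

-- ===== PORT B =====
-- for i in range(len(arr)): if arr[i] == target: index = i; break   — ported as a structural scan
-- carrying the running index i; returns -1 when no match.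
def lsLoop (arr : List Int) (target : Int) (i : Int) : Int :=
  match arr with
  | [] => -1
  | x :: xs => if x = target then i else lsLoop xs target (i + 1)

def delete_element_alt (arr : List Int) (target : Int) : Bool :=
  let index := lsLoop arr target 0
  if index = -1 then false else true

-- ===== PRECONDITION & SPEC =====
-- Pre_ excludes unsorted arrays that CONTAIN the target: there A's binary-search verdict is an
-- artefact of the element order (it may miss the target); sorted arrays — the function's stated
-- domain ("delete in sorted array") — and all target-free arrays are admitted.
def Pre_delete_element (arr : List Int) (target : Int) : Prop :=
  List.Pairwise (· ≤ ·) arr ∨ target ∉ arr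
instance (arr : List Int) (target : Int) : Decidable (Pre_delete_element arr target) := by
  unfold Pre_delete_element; infer_instance

def pvWitness_delete_element : List Int × Int := ([1, 3, 3, 7], 3)

def Spec_delete_element (arr : List Int) (target : Int) (out : Bool) : Prop := out = delete_element_alt arr target
instance (arr : List Int) (target : Int) (out : Bool) : Decidable (Spec_delete_element arr target out) := by unfold Spec_delete_element; infer_instance

-- ===== CLAIM (what is proved, stated in full; the proofs are below) =====
def Claim_equal_delete_element : Prop := ∀ (arr : List Int) (target : Int), Dom_delete_element arr target → Pre_delete_element arr target → Spec_delete_element arr target (delete_element arr target)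

-- ===== LEMMAS AND PROOFS =====

lemma sorted_getElem_le (arr : List Int) (hs : List.Pairwise (· ≤ ·) arr) (i j : Nat)
    (hij : i ≤ j) (hj : j < arr.length) : arr[i]'(by omega) ≤ arr[j] := by
  rcases Nat.lt_or_eq_of_le hij with h | h
  · exact List.pairwise_iff_getElem.mp hs i j (by omega) hj h
  · subst h; exact le_refl _

-- soundness of A's search: a non-(-1) result means the target occurs in the list
lemma bsLoop_ne_neg_one_mem (arr : List Int) (t : Int) :
    ∀ (fuel : Nat) (l r : Int), bsLoop arr t fuel l r ≠ -1 → t ∈ arr := by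
  intro fuel
  induction fuel with
  | zero => intro l r h; simp [bsLoop] at h
  | succ n ih =>
    intro l r h
    by_cases hlr : l ≤ r
    · simp only [bsLoop, if_pos hlr] at h
      cases hg : PySem.List.pyGet? arr (l + PySem.Int.floordiv (r - l) 2) with
      | none => rw [hg] at h; exact absurd rfl h
      | some v =>
        rw [hg] at h
        dsimp only at h
        by_cases hv : v = t
        · rw [← hv]; exact PySem.List.mem_of_pyGet?_eq_some _ hg
        · rw [if_neg hv] at h
          by_cases hlt : v < t
          · rw [if_pos hlt] at h; exact ih _ _ h
          · rw [if_neg hlt] at h; exact ih _ _ h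
    · simp [bsLoop, hlr] at h

-- completeness of A's search on sorted input: with enough fuel for the window, if some index in
-- the window holds the target, the search does not return -1
lemma bsLoop_complete (arr : List Int) (t : Int) (hs : List.Pairwise (· ≤ ·) arr) :
    ∀ (fuel : Nat) (l r : Int), 0 ≤ l → r < (arr.length : Int) → r + 1 - l ≤ (fuel : Int) →
      (∃ k : Nat, l ≤ (k : Int) ∧ (k : Int) ≤ r ∧ arr[k]? = some t) →
      bsLoop arr t fuel l r ≠ -1 := by
  intro fuel
  induction fuel with
  | zero =>
    intro l r h0 hr hf hex
    obtain ⟨k, hkl, hkr, _⟩ := hex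
    simp only [Nat.cast_zero] at hf
    omega
  | succ n ih =>
    intro l r h0 hr hf hex
    obtain ⟨k, hkl, hkr, hk⟩ := hex
    have hlr : l ≤ r := by omega
    have h2 : PySem.Int.floordiv (r - l) 2 = (r - l) / 2 :=
      PySem.Int.floordiv_eq_ediv_of_pos (by omega)
    simp only [bsLoop, if_pos hlr, h2]
    have hg : PySem.List.pyGet? arr (l + (r - l) / 2) = arr[(l + (r - l) / 2).toNat]? :=
      PySem.List.pyGet?_of_nonneg arr (by omega)
    rw [hg]
    obtain ⟨hklt, hkv⟩ := List.getElem?_eq_some_iff.mp hk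
    have hmlt : (l + (r - l) / 2).toNat < arr.length := by omega
    rw [List.getElem?_eq_getElem hmlt]
    dsimp only
    by_cases hv : arr[(l + (r - l) / 2).toNat] = t
    · rw [if_pos hv]; omega
    · rw [if_neg hv]
      by_cases hlt : arr[(l + (r - l) / 2).toNat] < t
      · rw [if_pos hlt]
        have hmk : l + (r - l) / 2 < (k : Int) := by
          by_contra hc
          have := sorted_getElem_le arr hs k (l + (r - l) / 2).toNat (by omega) hmlt
          rw [hkv] at this
          omega
        refine ih _ _ (by omega) hr (by push_cast at hf ⊢; omega) ⟨k, by omega, by omega, hk⟩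
      · rw [if_neg hlt]
        have ht : t < arr[(l + (r - l) / 2).toNat] := by
          rcases lt_trichotomy arr[(l + (r - l) / 2).toNat] t with h | h | h
          · exact absurd h hlt
          · exact absurd h hv
          · exact h
        have hmk : (k : Int) < l + (r - l) / 2 := by
          by_contra hc
          have := sorted_getElem_le arr hs (l + (r - l) / 2).toNat k (by omega) hklt
          rw [hkv] at this
          omega
        refine ih _ _ h0 (by omega) (by push_cast at hf ⊢; omega) ⟨k, by omega, by omega, hk⟩

lemma lsLoop_eq_neg_one_iff (t : Int) :
    ∀ (arr : List Int) (i : Int), 0 ≤ i → (lsLoop arr t i = -1 ↔ t ∉ arr) := by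
  intro arr
  induction arr with
  | nil => intro i _; simp [lsLoop]
  | cons x xs ih =>
    intro i hi
    by_cases hx : x = t
    · simp [lsLoop, hx]; omega
    · have := ih (i + 1) (by omega)
      simp [lsLoop, hx, this]
      exact fun _ => (Ne.symm hx)

-- ===== VERDICT (by name: the statement is the Claim_ definition above) =====
theorem delete_element_spec : Claim_equal_delete_element := by
  intro arr target _ hpre
  unfold Spec_delete_element delete_element delete_element_alt
  have hls := lsLoop_eq_neg_one_iff target arr 0 (by omega)
  by_cases hmem : target ∈ arr
  · have hsorted : List.Pairwise (· ≤ ·) arr := hpre.resolve_right (fun h => h hmem)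
    obtain ⟨k, hk, hget⟩ := List.getElem_of_mem hmem
    have hbs : bsLoop arr target (arr.length + 1) 0 ((arr.length : Int) - 1) ≠ -1 := by
      apply bsLoop_complete arr target hsorted _ 0 _ (by omega) (by omega) (by push_cast; omega)
      exact ⟨k, by omega, by omega, by rw [List.getElem?_eq_getElem hk, hget]⟩
    have hls2 : lsLoop arr target 0 ≠ -1 := fun h => (hls.mp h) hmem
    simp [hbs, hls2]
  · have hbs : ¬ bsLoop arr target (arr.length + 1) 0 ((arr.length : Int) - 1) ≠ -1 := by
      intro h; exact hmem (bsLoop_ne_neg_one_mem arr target _ _ _ h)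
    simp [hbs, hls.mpr hmem]
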